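-- pv_equiv track=rewrite | github.com/AikawaKai/BigScaleAnalyticsWorkspace | MiningDataStream/AMSalgorithm.py | secondMoment
-- ===== SOURCE A (Python) =====
-- def secondMoment(vector):
--     mydict = dict()
--     for el in vector:
--         if el not in mydict:
--             mydict[el] = 1
--         else:
--             mydict[el] += 1
--     return (sum([pow(value, 2) for key, value in mydict.items()]))
-- ===== SOURCE B (Python) =====
-- def secondMoment(vector):
--     counts = dict()
--     total = 0
--     for el in vector:
--         k = counts.get(el, 0) + 1
--         counts[el] = k
--         total += 2 * k - 1  # k^2 - (k-1)^2
--     return total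
-- ===== Notes on version B (the rewrite author's own statement) =====
-- stated objective: simpler
-- what changed: Single streaming pass: each increment of an element's count from k-1 to k adds 2k-1 to a running total (k^2 is the sum of the first k odd numbers), eliminating A's second pass that squares and sums the dict's values.
import Mathlib
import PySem

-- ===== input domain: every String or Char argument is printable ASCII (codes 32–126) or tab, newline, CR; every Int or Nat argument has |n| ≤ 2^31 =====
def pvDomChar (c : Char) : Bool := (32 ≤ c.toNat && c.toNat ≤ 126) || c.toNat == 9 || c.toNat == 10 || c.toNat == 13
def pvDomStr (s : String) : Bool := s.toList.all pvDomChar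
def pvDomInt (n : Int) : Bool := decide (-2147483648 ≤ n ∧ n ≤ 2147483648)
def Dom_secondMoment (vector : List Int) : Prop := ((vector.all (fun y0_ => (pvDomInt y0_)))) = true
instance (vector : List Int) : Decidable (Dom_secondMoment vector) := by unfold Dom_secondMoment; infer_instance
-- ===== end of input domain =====

-- B is a one-pass version of A: each count update from k-1 to k adds 2k-1 to a running
-- total, so the second pass that squares and sums the dict's values disappears ("simpler").

-- ===== PORT A =====
-- A: count occurrences in a dict, then sum the squares of the dict's values.
def secondMoment (vector : List Int) : Int :=
  let mydict : PySem.Dict Int Int :=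
    vector.foldl (fun d el =>
      if d.contains el = false then d.insert el 1
      else d.insert el (d.getD el 0 + 1)) PySem.Dict.empty
  (mydict.items.map (fun p => p.2 ^ 2)).sum

-- ===== PORT B =====
-- B: one streaming pass; incrementing a count to k adds 2k-1 (= k^2 - (k-1)^2) to the total.
def secondMoment_alt (vector : List Int) : Int :=
  (vector.foldl (fun (st : PySem.Dict Int Int × Int) el =>
      let k := st.1.getD el 0 + 1
      (st.1.insert el k, st.2 + 2 * k - 1)) (PySem.Dict.empty, 0)).2

-- ===== PRECONDITION & SPEC =====
def Spec_secondMoment (vector : List Int) (out : Int) : Prop := out = secondMoment_alt vector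
instance (vector : List Int) (out : Int) : Decidable (Spec_secondMoment vector out) := by unfold Spec_secondMoment; infer_instance

-- ===== CLAIM (what is proved, stated in full; the proofs are below) =====
def Claim_equal_secondMoment : Prop := ∀ (vector : List Int), Dom_secondMoment vector → Spec_secondMoment vector (secondMoment vector)

-- ===== LEMMAS AND PROOFS =====

-- sum of squared counts, read off the keys
def pvS (d : PySem.Dict Int Int) : Int := (d.keys.map (fun k => (d.getD k 0) ^ 2)).sum

def pvStep (d : PySem.Dict Int Int) (el : Int) : PySem.Dict Int Int :=
  d.insert el (d.getD el 0 + 1)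

lemma stepA_eq_pvStep (d : PySem.Dict Int Int) (el : Int) :
    (if d.contains el = false then d.insert el 1 else d.insert el (d.getD el 0 + 1)) = pvStep d el := by
  unfold pvStep
  by_cases h : d.contains el = false
  · simp [h, PySem.Dict.getD_of_not_contains (h := h)]
  · simp [h]

lemma sum_map_update (ks : List Int) (f g : Int → Int) (x : Int)
    (h : ∀ k ∈ ks, k ≠ x → f k = g k) (hx : x ∈ ks) (hnd : ks.Nodup) :
    (ks.map f).sum = (ks.map g).sum + (f x - g x) := by
  induction ks with
  | nil => cases hx
  | cons a t ih =>
    rcases List.nodup_cons.mp hnd with ⟨ha, hndt⟩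
    rcases List.mem_cons.mp hx with rfl | hxt
    · have : t.map f = t.map g := by
        apply List.map_congr_left
        intro k hk
        exact h k (List.mem_cons_of_mem _ hk) (fun he => ha (he ▸ hk))
      simp [this]; ring
    · have hax : a ≠ x := fun he => ha (he ▸ hxt)
      have := ih (fun k hk hkx => h k (List.mem_cons_of_mem _ hk) hkx) hxt hndt
      simp [this, h a (List.mem_cons_self) hax]; ring

lemma pvS_step (d : PySem.Dict Int Int) (el : Int) (hnd : d.keys.Nodup) :
    pvS (pvStep d el) = pvS d + (2 * (d.getD el 0) + 1) := by
  unfold pvS pvStep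
  by_cases h : d.contains el = true
  · rw [PySem.Dict.keys_insert_of_contains (h := h)]
    have hmem : el ∈ d.keys := (PySem.Dict.contains_iff_mem_keys d el).mp h
    rw [sum_map_update d.keys _ (fun k => (d.getD k 0) ^ 2) el
      (fun k _ hk => by rw [PySem.Dict.getD_insert_of_ne _ _ _ hk]) hmem hnd]
    rw [PySem.Dict.getD_insert_self]
    ring
  · have h' : d.contains el = false := by simpa using h
    have hnotmem : el ∉ d.keys := fun hm => by
      simp [(PySem.Dict.contains_iff_mem_keys d el).mpr hm] at h'
    rw [PySem.Dict.keys_insert_of_not_contains (h := h')]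
    have h0 : d.getD el 0 = 0 := PySem.Dict.getD_of_not_contains d 0 h'
    have hmap : d.keys.map (fun k => ((d.insert el (d.getD el 0 + 1)).getD k 0) ^ 2)
        = d.keys.map (fun k => (d.getD k 0) ^ 2) := by
      apply List.map_congr_left
      intro k hk
      have hne : k ≠ el := fun he => hnotmem (he ▸ hk)
      rw [PySem.Dict.getD_insert_of_ne _ _ _ hne]
    rw [List.map_append, List.sum_append, hmap]
    simp [PySem.Dict.getD_insert_self, h0]

lemma foldB_invariant (l : List Int) (d : PySem.Dict Int Int) (t : Int) (hnd : d.keys.Nodup) :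
    l.foldl (fun (st : PySem.Dict Int Int × Int) el =>
      let k := st.1.getD el 0 + 1
      (st.1.insert el k, st.2 + 2 * k - 1)) (d, t)
    = (l.foldl pvStep d, t + pvS (l.foldl pvStep d) - pvS d) := by
  induction l generalizing d t with
  | nil => simp
  | cons el l ih =>
    simp only [List.foldl_cons]
    have hnd' : (d.insert el (d.getD el 0 + 1)).keys.Nodup := PySem.Dict.nodup_keys_insert _ _ _ hnd
    rw [ih _ _ hnd']
    have hstep : d.insert el (d.getD el 0 + 1) = pvStep d el := rfl
    rw [hstep, pvS_step d el hnd]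
    simp only [Prod.mk.injEq]
    exact ⟨trivial, by ring⟩

lemma foldA_eq (l : List Int) (d : PySem.Dict Int Int) :
    l.foldl (fun d el => if d.contains el = false then d.insert el 1
      else d.insert el (d.getD el 0 + 1)) d = l.foldl pvStep d := by
  induction l generalizing d with
  | nil => rfl
  | cons el l ih => simp only [List.foldl_cons, stepA_eq_pvStep]

lemma items_sum_eq_pvS (d : PySem.Dict Int Int) (hnd : d.keys.Nodup) :
    (d.items.map (fun p => p.2 ^ 2)).sum = pvS d := by
  unfold pvS
  rw [PySem.Dict.items_eq_map_keys d hnd 0, List.map_map]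
  rfl

lemma nodup_foldA (l : List Int) :
    (l.foldl pvStep PySem.Dict.empty).keys.Nodup := by
  have := PySem.Dict.nodup_keys_foldl_insert l
    (fun (d : PySem.Dict Int Int) el => d.getD el 0 + 1)
    PySem.Dict.empty PySem.Dict.nodup_keys_empty
  rw [show pvStep = fun d x => d.insert x (d.getD x 0 + 1) from rfl]
  exact this

-- ===== VERDICT (by name: the statement is the Claim_ definition above) =====
theorem secondMoment_spec : Claim_equal_secondMoment := by
  intro vector _
  unfold Spec_secondMoment secondMoment secondMoment_alt
  rw [foldA_eq, foldB_invariant vector PySem.Dict.empty 0 PySem.Dict.nodup_keys_empty]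
  simp only
  rw [items_sum_eq_pvS _ (nodup_foldA vector)]
  simp [pvS, PySem.Dict.keys_empty]
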